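-- pv_equiv track=rewrite | github.com/siterepository/NEW-Lead-Gen | src/leadgen/agents/ksl/business_for_sale.py | _detect_business_type
-- ===== SOURCE A (Python) =====
-- def _detect_business_type(title: str, description: str) -> str:
--     """Classify the type of business being sold.
--
--     Returns a tag that the scoring pipeline can use to prioritize
--     leads with transferable skills (e.g. service businesses, sales,
--     consulting over manufacturing or agriculture).
--     """
--     text = f"{title} {description}".lower()
--
--     if any(kw in text for kw in ["restaurant", "food", "cafe", "catering"]):
--         return "food_service"
--     if any(kw in text for kw in ["salon", "spa", "beauty", "barber"]):
--         return "personal_care"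
--     if any(kw in text for kw in ["retail", "store", "shop", "ecommerce"]):
--         return "retail"
--     if any(kw in text for kw in ["construction", "contractor", "plumbing", "hvac"]):
--         return "construction_trades"
--     if any(kw in text for kw in ["consulting", "agency", "marketing", "advertising"]):
--         return "professional_services"
--     if any(kw in text for kw in ["insurance", "financial", "accounting", "tax"]):
--         return "financial_services"
--     if any(kw in text for kw in ["real estate", "property", "rental"]):
--         return "real_estate"
--     if any(kw in text for kw in ["franchise", "chain", "brand"]):
--         return "franchise"
--     if any(kw in text for kw in ["tech", "software", "saas", "app"]):
--         return "technology"
--     if any(kw in text for kw in ["fitness", "gym", "training"]):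
--         return "fitness"
--     if any(kw in text for kw in ["cleaning", "janitorial", "maid"]):
--         return "cleaning"
--     if any(kw in text for kw in ["landscape", "lawn", "tree"]):
--         return "landscaping"
--
--     return "general"
-- ===== SOURCE B (Python) =====
-- _TAGS = [
--     "food_service", "personal_care", "retail", "construction_trades",
--     "professional_services", "financial_services", "real_estate",
--     "franchise", "technology", "fitness", "cleaning", "landscaping",
-- ]
--
-- # flat keyword -> priority index of its category (lower index = higher priority)
-- _KEYWORD_PRIORITY = {
--     "restaurant": 0, "food": 0, "cafe": 0, "catering": 0,
--     "salon": 1, "spa": 1, "beauty": 1, "barber": 1,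
--     "retail": 2, "store": 2, "shop": 2, "ecommerce": 2,
--     "construction": 3, "contractor": 3, "plumbing": 3, "hvac": 3,
--     "consulting": 4, "agency": 4, "marketing": 4, "advertising": 4,
--     "insurance": 5, "financial": 5, "accounting": 5, "tax": 5,
--     "real estate": 6, "property": 6, "rental": 6,
--     "franchise": 7, "chain": 7, "brand": 7,
--     "tech": 8, "software": 8, "saas": 8, "app": 8,
--     "fitness": 9, "gym": 9, "training": 9,
--     "cleaning": 10, "janitorial": 10, "maid": 10,
--     "landscape": 11, "lawn": 11, "tree": 11,
-- }
--
--
-- def _detect_business_type(title: str, description: str) -> str: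
--     text = f"{title} {description}".lower()
--     best = min((i for kw, i in _KEYWORD_PRIORITY.items() if kw in text), default=None)
--     return "general" if best is None else _TAGS[best]
-- ===== Notes on version B (the rewrite author's own statement) =====
-- stated objective: alternative
-- what changed: Instead of A's ordered short-circuiting if-chain, B flattens all keywords into one keyword->priority map, computes the minimum priority index over every matching keyword in a single full pass, and looks the tag up in a table; correct because priority = minimal category index.
import Mathlib
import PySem

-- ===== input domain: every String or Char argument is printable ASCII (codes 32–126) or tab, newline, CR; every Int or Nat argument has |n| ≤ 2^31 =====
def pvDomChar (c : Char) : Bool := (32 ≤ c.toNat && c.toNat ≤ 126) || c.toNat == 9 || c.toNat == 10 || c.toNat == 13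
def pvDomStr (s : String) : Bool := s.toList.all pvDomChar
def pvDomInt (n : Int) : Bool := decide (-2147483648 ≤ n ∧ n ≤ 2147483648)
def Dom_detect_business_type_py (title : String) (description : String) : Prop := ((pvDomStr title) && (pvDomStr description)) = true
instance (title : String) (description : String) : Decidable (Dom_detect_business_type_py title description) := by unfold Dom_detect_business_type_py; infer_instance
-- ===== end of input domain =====

-- B replaces A's ordered short-circuit if-chain by one full pass computing the minimum
-- priority index over a flat keyword->priority map, then a tag-table lookup (objective: alternative).

-- ===== PORT A =====
-- literal if-chain, one branch per category, in A's order
def detect_business_type_py (title : String) (description : String) : String :=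
  let text := PySem.Str.lower (PySem.Str.join " " [title, description])
  if ["restaurant", "food", "cafe", "catering"].any (fun kw => PySem.Str.isIn kw text) then "food_service"
  else if ["salon", "spa", "beauty", "barber"].any (fun kw => PySem.Str.isIn kw text) then "personal_care"
  else if ["retail", "store", "shop", "ecommerce"].any (fun kw => PySem.Str.isIn kw text) then "retail"
  else if ["construction", "contractor", "plumbing", "hvac"].any (fun kw => PySem.Str.isIn kw text) then "construction_trades"
  else if ["consulting", "agency", "marketing", "advertising"].any (fun kw => PySem.Str.isIn kw text) then "professional_services"
  else if ["insurance", "financial", "accounting", "tax"].any (fun kw => PySem.Str.isIn kw text) then "financial_services"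
  else if ["real estate", "property", "rental"].any (fun kw => PySem.Str.isIn kw text) then "real_estate"
  else if ["franchise", "chain", "brand"].any (fun kw => PySem.Str.isIn kw text) then "franchise"
  else if ["tech", "software", "saas", "app"].any (fun kw => PySem.Str.isIn kw text) then "technology"
  else if ["fitness", "gym", "training"].any (fun kw => PySem.Str.isIn kw text) then "fitness"
  else if ["cleaning", "janitorial", "maid"].any (fun kw => PySem.Str.isIn kw text) then "cleaning"
  else if ["landscape", "lawn", "tree"].any (fun kw => PySem.Str.isIn kw text) then "landscaping"
  else "general"

-- ===== PORT B =====
-- the tag table _TAGS of Source B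
def pvTags : List String :=
  ["food_service", "personal_care", "retail", "construction_trades",
   "professional_services", "financial_services", "real_estate",
   "franchise", "technology", "fitness", "cleaning", "landscaping"]

-- the flat keyword -> priority map _KEYWORD_PRIORITY of Source B, in insertion order
def pvKeywordPriority : List (String × Nat) :=
  [("restaurant", 0), ("food", 0), ("cafe", 0), ("catering", 0),
   ("salon", 1), ("spa", 1), ("beauty", 1), ("barber", 1),
   ("retail", 2), ("store", 2), ("shop", 2), ("ecommerce", 2),
   ("construction", 3), ("contractor", 3), ("plumbing", 3), ("hvac", 3),
   ("consulting", 4), ("agency", 4), ("marketing", 4), ("advertising", 4),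
   ("insurance", 5), ("financial", 5), ("accounting", 5), ("tax", 5),
   ("real estate", 6), ("property", 6), ("rental", 6),
   ("franchise", 7), ("chain", 7), ("brand", 7),
   ("tech", 8), ("software", 8), ("saas", 8), ("app", 8),
   ("fitness", 9), ("gym", 9), ("training", 9),
   ("cleaning", 10), ("janitorial", 10), ("maid", 10),
   ("landscape", 11), ("lawn", 11), ("tree", 11)]

-- min(..., default=None) over the filtered generator, as a fold
def pvMinStep (text : String) (acc : Option Nat) (p : String × Nat) : Option Nat :=
  if PySem.Str.isIn p.1 text then
    some (match acc with | none => p.2 | some b => min b p.2)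
  else acc

def detect_business_type_py_alt (title : String) (description : String) : String :=
  let text := PySem.Str.lower (PySem.Str.join " " [title, description])
  match pvKeywordPriority.foldl (pvMinStep text) none with
  | none => "general"
  | some i => pvTags.getD i "general"

-- ===== PRECONDITION & SPEC =====
def Spec_detect_business_type_py (title : String) (description : String) (out : String) : Prop := out = detect_business_type_py_alt title description
instance (title : String) (description : String) (out : String) : Decidable (Spec_detect_business_type_py title description out) := by unfold Spec_detect_business_type_py; infer_instance

-- ===== CLAIM =====
def Claim_equal_detect_business_type_py : Prop := ∀ (title : String) (description : String), Dom_detect_business_type_py title description → Spec_detect_business_type_py title description (detect_business_type_py title description)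

-- ===== LEMMAS AND PROOFS =====

-- once the accumulator holds an index no later entry can improve, the fold is stable
theorem pvFoldl_stable (text : String) (b : Nat) :
    ∀ (l : List (String × Nat)), (∀ x ∈ l, b ≤ x.2) →
      l.foldl (pvMinStep text) (some b) = some b := by
  intro l
  induction l with
  | nil => intro _; rfl
  | cons x xs ih =>
      intro h
      have hb : b ≤ x.2 := h x (by simp)
      rw [List.foldl_cons]
      by_cases hp : PySem.Str.isIn x.1 text
      · have hstep : pvMinStep text (some b) x = some b := by
          simp only [pvMinStep, if_pos hp, Nat.min_eq_left hb]
        rw [hstep]; exact ih (fun y hy => h y (by simp [hy]))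
      · have hstep : pvMinStep text (some b) x = some b := by
          simp only [pvMinStep, if_neg hp]
        rw [hstep]; exact ih (fun y hy => h y (by simp [hy]))

-- a section whose entries all carry index i folds to `some i` iff one of its keywords matches
theorem pvFoldl_section (text : String) (i : Nat) :
    ∀ (l : List (String × Nat)), (∀ x ∈ l, x.2 = i) →
      l.foldl (pvMinStep text) none =
        (if l.any (fun x => PySem.Str.isIn x.1 text) then some i else none) := by
  intro l
  induction l with
  | nil => intro _; rfl
  | cons x xs ih =>
      intro h
      have hx : x.2 = i := h x (by simp)
      rw [List.foldl_cons, List.any_cons]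
      by_cases hp : PySem.Str.isIn x.1 text
      · have hstep : pvMinStep text none x = some i := by
          simp only [pvMinStep, if_pos hp, hx]
        rw [hstep, pvFoldl_stable text i xs (fun y hy => (h y (by simp [hy])).ge), hp]
        simp
      · have hstep : pvMinStep text none x = none := by
          simp only [pvMinStep, if_neg hp]
        rw [hstep, ih (fun y hy => h y (by simp [hy]))]
        have hp' : PySem.Str.isIn x.1 text = false := by simpa using hp
        rw [hp', Bool.false_or]

-- processing one category section followed by the rest of the table
theorem pvFoldl_chain (text : String) (i : Nat) (sec rest : List (String × Nat))
    (hsec : ∀ x ∈ sec, x.2 = i) (hrest : ∀ x ∈ rest, i ≤ x.2) :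
    (sec ++ rest).foldl (pvMinStep text) none =
      (if sec.any (fun x => PySem.Str.isIn x.1 text) then some i
       else rest.foldl (pvMinStep text) none) := by
  rw [List.foldl_append, pvFoldl_section text i sec hsec]
  split_ifs with hany
  · exact pvFoldl_stable text i rest hrest
  · rfl

-- the two bodies agree for every text
set_option maxHeartbeats 1000000 in
theorem pvMain (text : String) :
    (if ["restaurant", "food", "cafe", "catering"].any (fun kw => PySem.Str.isIn kw text) then "food_service"
     else if ["salon", "spa", "beauty", "barber"].any (fun kw => PySem.Str.isIn kw text) then "personal_care"
     else if ["retail", "store", "shop", "ecommerce"].any (fun kw => PySem.Str.isIn kw text) then "retail"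
     else if ["construction", "contractor", "plumbing", "hvac"].any (fun kw => PySem.Str.isIn kw text) then "construction_trades"
     else if ["consulting", "agency", "marketing", "advertising"].any (fun kw => PySem.Str.isIn kw text) then "professional_services"
     else if ["insurance", "financial", "accounting", "tax"].any (fun kw => PySem.Str.isIn kw text) then "financial_services"
     else if ["real estate", "property", "rental"].any (fun kw => PySem.Str.isIn kw text) then "real_estate"
     else if ["franchise", "chain", "brand"].any (fun kw => PySem.Str.isIn kw text) then "franchise"
     else if ["tech", "software", "saas", "app"].any (fun kw => PySem.Str.isIn kw text) then "technology"
     else if ["fitness", "gym", "training"].any (fun kw => PySem.Str.isIn kw text) then "fitness"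
     else if ["cleaning", "janitorial", "maid"].any (fun kw => PySem.Str.isIn kw text) then "cleaning"
     else if ["landscape", "lawn", "tree"].any (fun kw => PySem.Str.isIn kw text) then "landscaping"
     else "general") =
    (match pvKeywordPriority.foldl (pvMinStep text) none with
     | none => "general"
     | some i => pvTags.getD i "general") := by
  have hsplit : pvKeywordPriority =
      [("restaurant", (0:Nat)), ("food", 0), ("cafe", 0), ("catering", 0)] ++
      ([("salon", 1), ("spa", 1), ("beauty", 1), ("barber", 1)] ++
      ([("retail", 2), ("store", 2), ("shop", 2), ("ecommerce", 2)] ++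
      ([("construction", 3), ("contractor", 3), ("plumbing", 3), ("hvac", 3)] ++
      ([("consulting", 4), ("agency", 4), ("marketing", 4), ("advertising", 4)] ++
      ([("insurance", 5), ("financial", 5), ("accounting", 5), ("tax", 5)] ++
      ([("real estate", 6), ("property", 6), ("rental", 6)] ++
      ([("franchise", 7), ("chain", 7), ("brand", 7)] ++
      ([("tech", 8), ("software", 8), ("saas", 8), ("app", 8)] ++
      ([("fitness", 9), ("gym", 9), ("training", 9)] ++
      ([("cleaning", 10), ("janitorial", 10), ("maid", 10)] ++
      [("landscape", 11), ("lawn", 11), ("tree", 11)])))))))))) := by rfl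
  rw [hsplit]
  rw [pvFoldl_chain text 0 [("restaurant", (0:Nat)), ("food", (0:Nat)), ("cafe", (0:Nat)), ("catering", (0:Nat))] ([("salon", (1:Nat)), ("spa", (1:Nat)), ("beauty", (1:Nat)), ("barber", (1:Nat))] ++ ([("retail", (2:Nat)), ("store", (2:Nat)), ("shop", (2:Nat)), ("ecommerce", (2:Nat))] ++ ([("construction", (3:Nat)), ("contractor", (3:Nat)), ("plumbing", (3:Nat)), ("hvac", (3:Nat))] ++ ([("consulting", (4:Nat)), ("agency", (4:Nat)), ("marketing", (4:Nat)), ("advertising", (4:Nat))] ++ ([("insurance", (5:Nat)), ("financial", (5:Nat)), ("accounting", (5:Nat)), ("tax", (5:Nat))] ++ ([("real estate", (6:Nat)), ("property", (6:Nat)), ("rental", (6:Nat))] ++ ([("franchise", (7:Nat)), ("chain", (7:Nat)), ("brand", (7:Nat))] ++ ([("tech", (8:Nat)), ("software", (8:Nat)), ("saas", (8:Nat)), ("app", (8:Nat))] ++ ([("fitness", (9:Nat)), ("gym", (9:Nat)), ("training", (9:Nat))] ++ ([("cleaning", (10:Nat)), ("janitorial", (10:Nat)), ("maid", (10:Nat))]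 ++ [("landscape", (11:Nat)), ("lawn", (11:Nat)), ("tree", (11:Nat))])))))))))) (by decide) (by decide)]
  rw [pvFoldl_chain text 1 [("salon", (1:Nat)), ("spa", (1:Nat)), ("beauty", (1:Nat)), ("barber", (1:Nat))] ([("retail", (2:Nat)), ("store", (2:Nat)), ("shop", (2:Nat)), ("ecommerce", (2:Nat))] ++ ([("construction", (3:Nat)), ("contractor", (3:Nat)), ("plumbing", (3:Nat)), ("hvac", (3:Nat))] ++ ([("consulting", (4:Nat)), ("agency", (4:Nat)), ("marketing", (4:Nat)), ("advertising", (4:Nat))] ++ ([("insurance", (5:Nat)), ("financial", (5:Nat)), ("accounting", (5:Nat)), ("tax", (5:Nat))] ++ ([("real estate", (6:Nat)), ("property", (6:Nat)), ("rental", (6:Nat))] ++ ([("franchise", (7:Nat)), ("chain", (7:Nat)), ("brand", (7:Nat))] ++ ([("tech", (8:Nat)), ("software", (8:Nat)), ("saas", (8:Nat)), ("app", (8:Nat))] ++ ([("fitness", (9:Nat)), ("gym", (9:Nat)), ("training", (9:Nat))] ++ ([("cleaning", (10:Nat)), ("janitorial", (10:Nat)), ("maid", (10:Nat))] ++ [("landscape",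 (11:Nat)), ("lawn", (11:Nat)), ("tree", (11:Nat))]))))))))) (by decide) (by decide)]
  rw [pvFoldl_chain text 2 [("retail", (2:Nat)), ("store", (2:Nat)), ("shop", (2:Nat)), ("ecommerce", (2:Nat))] ([("construction", (3:Nat)), ("contractor", (3:Nat)), ("plumbing", (3:Nat)), ("hvac", (3:Nat))] ++ ([("consulting", (4:Nat)), ("agency", (4:Nat)), ("marketing", (4:Nat)), ("advertising", (4:Nat))] ++ ([("insurance", (5:Nat)), ("financial", (5:Nat)), ("accounting", (5:Nat)), ("tax", (5:Nat))] ++ ([("real estate", (6:Nat)), ("property", (6:Nat)), ("rental", (6:Nat))] ++ ([("franchise", (7:Nat)), ("chain", (7:Nat)), ("brand", (7:Nat))] ++ ([("tech", (8:Nat)), ("software", (8:Nat)), ("saas", (8:Nat)), ("app", (8:Nat))] ++ ([("fitness", (9:Nat)), ("gym", (9:Nat)), ("training", (9:Nat))] ++ ([("cleaning", (10:Nat)), ("janitorial", (10:Nat)), ("maid", (10:Nat))] ++ [("landscape", (11:Nat)), ("lawn", (11:Nat)), ("tree", (11:Nat))])))))))) (by decide) (by decide)]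
  rw [pvFoldl_chain text 3 [("construction", (3:Nat)), ("contractor", (3:Nat)), ("plumbing", (3:Nat)), ("hvac", (3:Nat))] ([("consulting", (4:Nat)), ("agency", (4:Nat)), ("marketing", (4:Nat)), ("advertising", (4:Nat))] ++ ([("insurance", (5:Nat)), ("financial", (5:Nat)), ("accounting", (5:Nat)), ("tax", (5:Nat))] ++ ([("real estate", (6:Nat)), ("property", (6:Nat)), ("rental", (6:Nat))] ++ ([("franchise", (7:Nat)), ("chain", (7:Nat)), ("brand", (7:Nat))] ++ ([("tech", (8:Nat)), ("software", (8:Nat)), ("saas", (8:Nat)), ("app", (8:Nat))] ++ ([("fitness", (9:Nat)), ("gym", (9:Nat)), ("training", (9:Nat))] ++ ([("cleaning", (10:Nat)), ("janitorial", (10:Nat)), ("maid", (10:Nat))] ++ [("landscape", (11:Nat)), ("lawn", (11:Nat)), ("tree", (11:Nat))]))))))) (by decide) (by decide)]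
  rw [pvFoldl_chain text 4 [("consulting", (4:Nat)), ("agency", (4:Nat)), ("marketing", (4:Nat)), ("advertising", (4:Nat))] ([("insurance", (5:Nat)), ("financial", (5:Nat)), ("accounting", (5:Nat)), ("tax", (5:Nat))] ++ ([("real estate", (6:Nat)), ("property", (6:Nat)), ("rental", (6:Nat))] ++ ([("franchise", (7:Nat)), ("chain", (7:Nat)), ("brand", (7:Nat))] ++ ([("tech", (8:Nat)), ("software", (8:Nat)), ("saas", (8:Nat)), ("app", (8:Nat))] ++ ([("fitness", (9:Nat)), ("gym", (9:Nat)), ("training", (9:Nat))] ++ ([("cleaning", (10:Nat)), ("janitorial", (10:Nat)), ("maid", (10:Nat))] ++ [("landscape", (11:Nat)), ("lawn", (11:Nat)), ("tree", (11:Nat))])))))) (by decide) (by decide)]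
  rw [pvFoldl_chain text 5 [("insurance", (5:Nat)), ("financial", (5:Nat)), ("accounting", (5:Nat)), ("tax", (5:Nat))] ([("real estate", (6:Nat)), ("property", (6:Nat)), ("rental", (6:Nat))] ++ ([("franchise", (7:Nat)), ("chain", (7:Nat)), ("brand", (7:Nat))] ++ ([("tech", (8:Nat)), ("software", (8:Nat)), ("saas", (8:Nat)), ("app", (8:Nat))] ++ ([("fitness", (9:Nat)), ("gym", (9:Nat)), ("training", (9:Nat))] ++ ([("cleaning", (10:Nat)), ("janitorial", (10:Nat)), ("maid", (10:Nat))] ++ [("landscape", (11:Nat)), ("lawn", (11:Nat)), ("tree", (11:Nat))]))))) (by decide) (by decide)]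
  rw [pvFoldl_chain text 6 [("real estate", (6:Nat)), ("property", (6:Nat)), ("rental", (6:Nat))] ([("franchise", (7:Nat)), ("chain", (7:Nat)), ("brand", (7:Nat))] ++ ([("tech", (8:Nat)), ("software", (8:Nat)), ("saas", (8:Nat)), ("app", (8:Nat))] ++ ([("fitness", (9:Nat)), ("gym", (9:Nat)), ("training", (9:Nat))] ++ ([("cleaning", (10:Nat)), ("janitorial", (10:Nat)), ("maid", (10:Nat))] ++ [("landscape", (11:Nat)), ("lawn", (11:Nat)), ("tree", (11:Nat))])))) (by decide) (by decide)]
  rw [pvFoldl_chain text 7 [("franchise", (7:Nat)), ("chain", (7:Nat)), ("brand", (7:Nat))] ([("tech", (8:Nat)), ("software", (8:Nat)), ("saas", (8:Nat)), ("app", (8:Nat))] ++ ([("fitness", (9:Nat)), ("gym", (9:Nat)), ("training", (9:Nat))] ++ ([("cleaning", (10:Nat)), ("janitorial", (10:Nat)), ("maid", (10:Nat))] ++ [("landscape", (11:Nat)), ("lawn", (11:Nat)), ("tree", (11:Nat))]))) (by decide) (by decide)]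
  rw [pvFoldl_chain text 8 [("tech", (8:Nat)), ("software", (8:Nat)), ("saas", (8:Nat)), ("app", (8:Nat))] ([("fitness", (9:Nat)), ("gym", (9:Nat)), ("training", (9:Nat))] ++ ([("cleaning", (10:Nat)), ("janitorial", (10:Nat)), ("maid", (10:Nat))] ++ [("landscape", (11:Nat)), ("lawn", (11:Nat)), ("tree", (11:Nat))])) (by decide) (by decide)]
  rw [pvFoldl_chain text 9 [("fitness", (9:Nat)), ("gym", (9:Nat)), ("training", (9:Nat))] ([("cleaning", (10:Nat)), ("janitorial", (10:Nat)), ("maid", (10:Nat))] ++ [("landscape", (11:Nat)), ("lawn", (11:Nat)), ("tree", (11:Nat))]) (by decide) (by decide)]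
  rw [pvFoldl_chain text 10 [("cleaning", (10:Nat)), ("janitorial", (10:Nat)), ("maid", (10:Nat))] [("landscape", (11:Nat)), ("lawn", (11:Nat)), ("tree", (11:Nat))] (by decide) (by decide)]
  rw [pvFoldl_section text 11 [("landscape", (11:Nat)), ("lawn", (11:Nat)), ("tree", (11:Nat))] (by decide)]
  simp only [List.any_cons, List.any_nil, Bool.or_false]
  by_cases h0 : ((PySem.Str.isIn "restaurant" text || (PySem.Str.isIn "food" text || (PySem.Str.isIn "cafe" text || PySem.Str.isIn "catering" text)))) = true
  · rw [if_pos h0, if_pos h0]; rfl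
  · rw [if_neg h0, if_neg h0]
    by_cases h1 : ((PySem.Str.isIn "salon" text || (PySem.Str.isIn "spa" text || (PySem.Str.isIn "beauty" text || PySem.Str.isIn "barber" text)))) = true
    · rw [if_pos h1, if_pos h1]; rfl
    · rw [if_neg h1, if_neg h1]
      by_cases h2 : ((PySem.Str.isIn "retail" text || (PySem.Str.isIn "store" text || (PySem.Str.isIn "shop" text || PySem.Str.isIn "ecommerce" text)))) = true
      · rw [if_pos h2, if_pos h2]; rfl
      · rw [if_neg h2, if_neg h2]
        by_cases h3 : ((PySem.Str.isIn "construction" text || (PySem.Str.isIn "contractor" text || (PySem.Str.isIn "plumbing" text || PySem.Str.isIn "hvac" text)))) = true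
        · rw [if_pos h3, if_pos h3]; rfl
        · rw [if_neg h3, if_neg h3]
          by_cases h4 : ((PySem.Str.isIn "consulting" text || (PySem.Str.isIn "agency" text || (PySem.Str.isIn "marketing" text || PySem.Str.isIn "advertising" text)))) = true
          · rw [if_pos h4, if_pos h4]; rfl
          · rw [if_neg h4, if_neg h4]
            by_cases h5 : ((PySem.Str.isIn "insurance" text || (PySem.Str.isIn "financial" text || (PySem.Str.isIn "accounting" text || PySem.Str.isIn "tax" text)))) = true
            · rw [if_pos h5, if_pos h5]; rfl
            · rw [if_neg h5, if_neg h5]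
              by_cases h6 : ((PySem.Str.isIn "real estate" text || (PySem.Str.isIn "property" text || PySem.Str.isIn "rental" text))) = true
              · rw [if_pos h6, if_pos h6]; rfl
              · rw [if_neg h6, if_neg h6]
                by_cases h7 : ((PySem.Str.isIn "franchise" text || (PySem.Str.isIn "chain" text || PySem.Str.isIn "brand" text))) = true
                · rw [if_pos h7, if_pos h7]; rfl
                · rw [if_neg h7, if_neg h7]
                  by_cases h8 : ((PySem.Str.isIn "tech" text || (PySem.Str.isIn "software" text || (PySem.Str.isIn "saas" text || PySem.Str.isIn "app" text)))) = true
                  · rw [if_pos h8, if_pos h8]; rfl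
                  · rw [if_neg h8, if_neg h8]
                    by_cases h9 : ((PySem.Str.isIn "fitness" text || (PySem.Str.isIn "gym" text || PySem.Str.isIn "training" text))) = true
                    · rw [if_pos h9, if_pos h9]; rfl
                    · rw [if_neg h9, if_neg h9]
                      by_cases h10 : ((PySem.Str.isIn "cleaning" text || (PySem.Str.isIn "janitorial" text || PySem.Str.isIn "maid" text))) = true
                      · rw [if_pos h10, if_pos h10]; rfl
                      · rw [if_neg h10, if_neg h10]
                        by_cases h11 : ((PySem.Str.isIn "landscape" text || (PySem.Str.isIn "lawn" text || PySem.Str.isIn "tree" text))) = true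
                        · rw [if_pos h11, if_pos h11]; rfl
                        · rw [if_neg h11, if_neg h11]

-- ===== VERDICT =====
theorem detect_business_type_py_spec : Claim_equal_detect_business_type_py := by
  intro title description _
  unfold Spec_detect_business_type_py detect_business_type_py detect_business_type_py_alt
  exact pvMain (PySem.Str.lower (PySem.Str.join " " [title, description]))
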